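-- pv_equiv track=rewrite | github.com/tailintalent/PredictionCode | util.py | sort_two_lists
-- ===== SOURCE A (Python) =====
-- from copy import deepcopy
--
-- def sort_two_lists(list1, list2, reverse = False):
--     """Sort two lists according to the first list."""
--     from operator import itemgetter
--     if reverse:
--         List = deepcopy([list(x) for x in zip(*sorted(zip(deepcopy(list1), deepcopy(list2)), key=itemgetter(0), reverse=True))])
--     else:
--         List = deepcopy([list(x) for x in zip(*sorted(zip(deepcopy(list1), deepcopy(list2)), key=itemgetter(0)))])
--     if len(List) == 0:
--         return [], []
--     else:
--         return List[0], List[1]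
-- ===== SOURCE B (Python) =====
-- from copy import deepcopy
--
-- def sort_two_lists(list1, list2, reverse=False):
--     """Sort two lists according to the first list (argsort + gather)."""
--     n = min(len(list1), len(list2))
--     order = sorted(range(n), key=lambda i: list1[i], reverse=reverse)
--     return [deepcopy(list1[i]) for i in order], [deepcopy(list2[i]) for i in order]
-- ===== Notes on version B (the rewrite author's own statement) =====
-- stated objective: alternative
-- what changed: Replaces A's deepcopy-zip-sort-unzip pipeline by an argsort over the first list followed by gathering both lists through the index permutation.
import Mathlib
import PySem

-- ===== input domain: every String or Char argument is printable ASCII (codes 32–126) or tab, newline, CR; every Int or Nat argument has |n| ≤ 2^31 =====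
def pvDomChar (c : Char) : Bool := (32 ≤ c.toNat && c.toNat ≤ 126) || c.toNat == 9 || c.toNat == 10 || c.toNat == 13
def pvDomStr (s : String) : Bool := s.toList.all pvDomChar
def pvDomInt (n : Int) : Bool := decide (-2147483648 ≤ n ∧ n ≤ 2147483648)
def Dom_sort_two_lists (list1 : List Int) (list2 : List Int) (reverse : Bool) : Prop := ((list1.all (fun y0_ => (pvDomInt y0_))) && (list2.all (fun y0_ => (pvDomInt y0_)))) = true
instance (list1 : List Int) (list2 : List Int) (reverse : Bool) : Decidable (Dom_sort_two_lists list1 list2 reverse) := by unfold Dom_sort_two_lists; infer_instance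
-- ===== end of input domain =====

-- B replaces A's deepcopy/zip/sort/unzip pipeline by an argsort over list1 plus two gathers
-- (alternative decomposition, same cost; on Int elements deepcopy is identity, so return values match).

-- ===== PORT A =====
-- zip(*pairs) transposes the sorted pair list into [firsts, seconds]; ported by the two
-- component maps, with A's len(List)==0 branch kept.
-- 'List' of A: transpose the sorted pair list, then A's len==0 branch
def sortTwoUnzip (L : List (Int × Int)) : List Int × List Int :=
  if L.length = 0 then ([], [])
  else (L.map Prod.fst, L.map Prod.snd)

def sort_two_lists (list1 : List Int) (list2 : List Int) (reverse : Bool) : List Int × List Int :=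
  sortTwoUnzip
    (if reverse then PySem.List.sorted (list1.zip list2) (fun x => x.1) true
     else PySem.List.sorted (list1.zip list2) (fun x => x.1) false)

-- ===== PORT B =====
-- order = sorted(range(n), key=lambda i: list1[i], reverse), n = min of the lengths
def argsortMin (list1 : List Int) (list2 : List Int) (reverse : Bool) : List Nat :=
  PySem.List.sorted (List.range (min list1.length list2.length)) (fun i => list1.getD i 0) reverse

def sort_two_lists_alt (list1 : List Int) (list2 : List Int) (reverse : Bool) : List Int × List Int :=
  ((argsortMin list1 list2 reverse).map (fun i => list1.getD i 0),
   (argsortMin list1 list2 reverse).map (fun i => list2.getD i 0))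

-- ===== PRECONDITION & SPEC =====
def Spec_sort_two_lists (list1 : List Int) (list2 : List Int) (reverse : Bool) (out : List Int × List Int) : Prop := out = sort_two_lists_alt list1 list2 reverse
instance (list1 : List Int) (list2 : List Int) (reverse : Bool) (out : List Int × List Int) : Decidable (Spec_sort_two_lists list1 list2 reverse out) := by unfold Spec_sort_two_lists; infer_instance

-- ===== CLAIM (what is proved, stated in full; the proofs are below) =====
def Claim_equal_sort_two_lists : Prop := ∀ (list1 : List Int) (list2 : List Int) (reverse : Bool), Dom_sort_two_lists list1 list2 reverse → Spec_sort_two_lists list1 list2 reverse (sort_two_lists list1 list2 reverse)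

-- ===== LEMMAS AND PROOFS =====

theorem insertBy_map {α β : Type} (f : α → β) (cmp : β → β → Bool) (x : α) (ys : List α) :
    PySem.List.insertBy cmp (f x) (ys.map f)
      = (PySem.List.insertBy (fun a b => cmp (f a) (f b)) x ys).map f := by
  induction ys with
  | nil => simp [PySem.List.insertBy]
  | cons y ys ih =>
      simp only [List.map_cons, PySem.List.insertBy]
      by_cases h : cmp (f x) (f y) = true <;> simp [h, ih]

theorem foldl_insertBy_map {α β : Type} (f : α → β) (cmp : β → β → Bool) (xs : List α)
    (acc : List α) :
    (xs.map f).foldl (fun acc x => PySem.List.insertBy cmp x acc) (acc.map f)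
      = (xs.foldl (fun acc x => PySem.List.insertBy (fun a b => cmp (f a) (f b)) x acc) acc).map f := by
  induction xs generalizing acc with
  | nil => rfl
  | cons x xs ih =>
      simp only [List.map_cons, List.foldl_cons]
      rw [insertBy_map f cmp x acc, ih]

theorem sorted_map {α β κ : Type} [LT κ] [DecidableLT κ] (f : α → β) (key : β → κ)
    (xs : List α) (rev : Bool) :
    PySem.List.sorted (xs.map f) key rev
      = (PySem.List.sorted xs (fun x => key (f x)) rev).map f := by
  cases rev with
  | false =>
      rw [PySem.List.sorted_eq_foldl_insertBy, PySem.List.sorted_eq_foldl_insertBy]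
      exact foldl_insertBy_map f (fun a b => decide (key a < key b)) xs []
  | true =>
      rw [PySem.List.sorted_rev_eq_foldl_insertBy, PySem.List.sorted_rev_eq_foldl_insertBy]
      exact foldl_insertBy_map f (fun a b => decide (key b < key a)) xs []

theorem zip_eq_map_range (l1 l2 : List Int) :
    l1.zip l2 = (List.range (min l1.length l2.length)).map
      (fun i => (l1.getD i 0, l2.getD i 0)) := by
  apply List.ext_getElem
  · simp
  · intro i h1 h2
    simp only [List.length_zip] at h1
    simp [List.getElem_zip, Nat.lt_min.mp h1]

theorem sort_two_lists_eq (list1 list2 : List Int) (reverse : Bool) :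
    sort_two_lists list1 list2 reverse = sort_two_lists_alt list1 list2 reverse := by
  unfold sort_two_lists sortTwoUnzip sort_two_lists_alt argsortMin
  have hz := zip_eq_map_range list1 list2
  have hL : (if reverse then PySem.List.sorted (list1.zip list2) (fun x => x.1) true
      else PySem.List.sorted (list1.zip list2) (fun x => x.1) false)
      = (PySem.List.sorted (List.range (min list1.length list2.length))
          (fun i => list1.getD i 0) reverse).map (fun i => (list1.getD i 0, list2.getD i 0)) := by
    cases reverse <;>
      simp only [if_true, if_false, Bool.false_eq_true, hz,
        sorted_map (fun i => (list1.getD i 0, list2.getD i 0)) (fun x => x.1)]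
  rw [hL]
  by_cases h : (PySem.List.sorted (List.range (min list1.length list2.length))
      (fun i => list1.getD i 0) reverse) = []
  · rw [h]
    simp
  · have hne : ¬((PySem.List.sorted (List.range (min list1.length list2.length))
        (fun i => list1.getD i 0) reverse).length = 0) := by
      exact fun hc => h (List.length_eq_zero_iff.mp hc)
    rw [List.length_map, if_neg hne]
    simp [List.map_map]

-- ===== VERDICT (by name: the statement is the Claim_ definition above) =====
theorem sort_two_lists_spec : Claim_equal_sort_two_lists := by
  intro list1 list2 reverse _
  exact sort_two_lists_eq list1 list2 reverse
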